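-- pv_equiv track=rewrite | github.com/OtterBrowser/otter-browser | packaging/deploy.py | escape_windows_executable_path
-- ===== SOURCE A (Python) =====
-- def escape_windows_executable_path(executable_path):
-- 	if ' ' not in executable_path:
-- 		return executable_path
--
-- 	segments = executable_path.split('\\')
-- 	escaped_segments = []
--
-- 	for segment in segments:
-- 		if ' ' in segment:
-- 			segment = '"{}"'.format(segment)
--
-- 		escaped_segments.append(segment)
--
-- 	return '\\'.join(escaped_segments)
-- ===== SOURCE B (Python) =====
-- def escape_windows_executable_path(executable_path):
-- 	# Single left-to-right scan: copy backslashes through, and emit each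
-- 	# maximal backslash-free run, wrapped in quotes when it contains a space.
-- 	out = []
-- 	i = 0
-- 	n = len(executable_path)
-- 	while i < n:
-- 		if executable_path[i] == '\\':
-- 			out.append('\\')
-- 			i += 1
-- 		else:
-- 			j = i
-- 			while j < n and executable_path[j] != '\\':
-- 				j += 1
-- 			run = executable_path[i:j]
-- 			out.append('"{}"'.format(run) if ' ' in run else run)
-- 			i = j
-- 	return ''.join(out)
-- ===== Notes on version B (the rewrite author's own statement) =====
-- stated objective: alternative
-- what changed: B replaces split('\')/quote-each-segment/join (plus a containment pre-check) with a single left-to-right scan that copies backslashes through and emits each maximal backslash-free run, quoted when it contains a space.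
import Mathlib
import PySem

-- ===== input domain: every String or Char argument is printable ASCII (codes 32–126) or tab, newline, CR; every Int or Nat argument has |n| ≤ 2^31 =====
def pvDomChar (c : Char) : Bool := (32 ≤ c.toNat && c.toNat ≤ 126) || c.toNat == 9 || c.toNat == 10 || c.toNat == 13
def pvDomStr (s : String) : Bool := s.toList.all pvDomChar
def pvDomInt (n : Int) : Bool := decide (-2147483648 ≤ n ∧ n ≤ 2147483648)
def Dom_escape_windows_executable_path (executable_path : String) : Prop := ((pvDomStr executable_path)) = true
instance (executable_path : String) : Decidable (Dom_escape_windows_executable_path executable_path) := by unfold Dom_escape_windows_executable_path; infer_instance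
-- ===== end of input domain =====

-- B scans once left-to-right instead of split/map/join; same return value, no speed claim.

-- ===== PORT A =====
-- transliteration of A: guard on ' ' in path, split on '\', quote segments containing ' ', join back
def escape_windows_executable_path (executable_path : String) : String :=
  if PySem.Str.isIn " " executable_path = false then executable_path
  else
    let segments := PySem.Chars.splitOn executable_path.toList ['\\']
    let escaped_segments := segments.foldl
      (fun acc segment =>
        acc ++ [if PySem.Chars.isIn [' '] segment then '"' :: (segment ++ ['"']) else segment]) []
    String.ofList (PySem.Chars.join ['\\'] escaped_segments)

-- ===== PORT B =====
-- transliteration of B's while-loop scanner: a backslash is copied through and the index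
-- advances by one; otherwise the maximal backslash-free run starting here is emitted
-- (quoted when it contains a space) and the index jumps past it.  The index scan over the
-- string is rendered as the same scan over the remaining character list.
def pvScan : List Char → List Char
  | [] => []
  | a :: rest =>
      if a = '\\' then '\\' :: pvScan rest
      else
        (if PySem.Chars.isIn [' '] ((a :: rest).takeWhile (fun x => x ≠ '\\')) then
            '"' :: (((a :: rest).takeWhile (fun x => x ≠ '\\')) ++ ['"'])
          else (a :: rest).takeWhile (fun x => x ≠ '\\')) ++
        pvScan ((a :: rest).dropWhile (fun x => x ≠ '\\'))
  termination_by l => l.length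
  decreasing_by
  · simp
  · rename_i h
    rw [List.dropWhile_cons_of_pos (by simp [h])]
    exact Nat.lt_succ_of_le (List.length_dropWhile_le _ _)

def escape_windows_executable_path_alt (executable_path : String) : String :=
  String.ofList (pvScan executable_path.toList)

-- ===== PRECONDITION & SPEC =====
def Spec_escape_windows_executable_path (executable_path : String) (out : String) : Prop := out = escape_windows_executable_path_alt executable_path
instance (executable_path : String) (out : String) : Decidable (Spec_escape_windows_executable_path executable_path out) := by unfold Spec_escape_windows_executable_path; infer_instance

-- ===== CLAIM (what is proved, stated in full; the proofs are below) =====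
def Claim_equal_escape_windows_executable_path : Prop := ∀ (executable_path : String), Dom_escape_windows_executable_path executable_path → Spec_escape_windows_executable_path executable_path (escape_windows_executable_path executable_path)

-- ===== LEMMAS AND PROOFS =====

-- structural recursion computing Python's split on a single-character separator
def pvSplit1 (c : Char) : List Char → List (List Char)
  | [] => [[]]
  | a :: rest => if a = c then [] :: pvSplit1 c rest else (pvSplit1 c rest).modifyHead (a :: ·)

theorem pvSplit1_ne_nil (c : Char) : ∀ (l : List Char), pvSplit1 c l ≠ [] := by
  intro l
  induction l with
  | nil => simp [pvSplit1]
  | cons a rest ih =>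
    simp only [pvSplit1]
    split
    · simp
    · cases h : pvSplit1 c rest with
      | nil => exact absurd h ih
      | cons p ps => simp

theorem pvModifyHead_id (L : List (List Char)) : L.modifyHead (fun x => x) = L := by
  cases L <;> simp

theorem pvGo_spec (c : Char) :
    ∀ (fuel : Nat) (l cur : List Char) (hacc : List (List Char)), l.length < fuel →
      PySem.Chars.splitOn.go [c] fuel l cur hacc =
        hacc.reverse ++ (pvSplit1 c l).modifyHead (cur.reverse ++ ·) := by
  intro fuel
  induction fuel with
  | zero => intro l cur hacc h; omega
  | succ f ih =>
    intro l cur hacc h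
    cases l with
    | nil =>
      simp [PySem.Chars.splitOn.go, pvSplit1]
    | cons a rest =>
      by_cases hac : a = c
      · subst hac
        have hpre : List.isPrefixOf [a] (a :: rest) = true := by simp [List.isPrefixOf]
        simp only [PySem.Chars.splitOn.go, hpre, if_true]
        rw [ih _ _ _ (by simp at h ⊢; omega)]
        simp [pvSplit1, pvModifyHead_id]
      · have hpre : List.isPrefixOf [c] (a :: rest) = false := by
          simp [List.isPrefixOf]
          exact fun hh => hac hh.symm
        simp only [PySem.Chars.splitOn.go, hpre, Bool.false_eq_true, if_false]
        rw [ih _ _ _ (by simp at h ⊢; omega)]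
        cases hs : pvSplit1 c rest with
        | nil => exact absurd hs (pvSplit1_ne_nil c rest)
        | cons p ps => simp [pvSplit1, hac, hs, List.modifyHead]

theorem pvSplitOn_eq (c : Char) (l : List Char) :
    PySem.Chars.splitOn l [c] = pvSplit1 c l := by
  show PySem.Chars.splitOn.go [c] (l.length + 1) l [] [] = pvSplit1 c l
  rw [pvGo_spec c (l.length + 1) l [] [] (by omega)]
  cases hs : pvSplit1 c l with
  | nil => exact absurd hs (pvSplit1_ne_nil c l)
  | cons p ps => simp

theorem pvFoldl_append_map {α β : Type} (f : α → β) :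
    ∀ (xs : List α) (acc : List β),
      xs.foldl (fun a x => a ++ [f x]) acc = acc ++ xs.map f := by
  intro xs
  induction xs with
  | nil => simp
  | cons x xs ih => intro acc; simp [List.foldl, ih]

theorem pvMem_iff_isIn (a : Char) (l : List Char) :
    PySem.Chars.isIn [a] l = true ↔ a ∈ l := by
  rw [PySem.Chars.isIn_iff_infix]
  constructor
  · intro h
    exact (List.singleton_sublist).mp h.sublist
  · intro h
    obtain ⟨s, t, rfl⟩ := List.append_of_mem h
    exact ⟨s, t, by simp⟩

theorem pvDropWhile_head (p : Char → Bool) :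
    ∀ (l : List Char) (hd : Char) (r : List Char),
      List.dropWhile p l = hd :: r → p hd = false := by
  intro l
  induction l with
  | nil => intro hd r h; simp [List.dropWhile] at h
  | cons a rest ih =>
    intro hd r h
    by_cases ha : p a
    · rw [List.dropWhile_cons_of_pos ha] at h
      exact ih hd r h
    · rw [List.dropWhile_cons_of_neg ha] at h
      cases h
      exact Bool.eq_false_iff.mpr ha

-- pvSplit1 in takeWhile/dropWhile form
theorem pvSplit1_run (c : Char) :
    ∀ l : List Char, pvSplit1 c l =
      (l.takeWhile (fun x => x ≠ c)) ::
        (match l.dropWhile (fun x => x ≠ c) with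
          | [] => ([] : List (List Char))
          | _ :: r => pvSplit1 c r) := by
  intro l
  induction l with
  | nil => simp [pvSplit1]
  | cons a rest ih =>
    by_cases h : a = c
    · subst h
      simp [pvSplit1]
    · rw [pvSplit1, if_neg h, ih,
        List.takeWhile_cons_of_pos (by simp [h]),
        List.dropWhile_cons_of_pos (by simp [h])]
      simp [List.modifyHead]

theorem pvSplit1_run_nil (c : Char) (l : List Char)
    (h : l.dropWhile (fun x => x ≠ c) = []) :
    pvSplit1 c l = [l.takeWhile (fun x => x ≠ c)] := by
  rw [pvSplit1_run, h]

theorem pvSplit1_run_cons (c : Char) (l : List Char) (hd : Char) (r : List Char)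
    (h : l.dropWhile (fun x => x ≠ c) = hd :: r) :
    pvSplit1 c l = l.takeWhile (fun x => x ≠ c) :: pvSplit1 c r := by
  rw [pvSplit1_run, h]

theorem pvMain (l : List Char) :
    PySem.Chars.join ['\\'] ((pvSplit1 '\\' l).map
      (fun segment => if PySem.Chars.isIn [' '] segment then '"' :: (segment ++ ['"']) else segment)) =
    pvScan l := by
  fun_induction pvScan l with
  | case1 => decide
  | case2 rest ih =>
    simp only [pvSplit1, reduceIte]
    cases hs : pvSplit1 '\\' rest with
    | nil => exact absurd hs (pvSplit1_ne_nil _ rest)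
    | cons p ps =>
      rw [hs] at ih
      have hnil : PySem.Chars.isIn [' '] ([] : List Char) = false := by decide
      simp only [List.map_cons, hnil, Bool.false_eq_true, if_false]
      rw [PySem.Chars.join_cons_cons]
      simp only [List.map_cons] at ih
      simp [ih]
  | case3 a rest hne ih =>
    cases hrem : List.dropWhile (fun x => x ≠ '\\') (a :: rest) with
    | nil =>
      rw [pvSplit1_run_nil _ _ hrem]
      simp [PySem.Chars.join_singleton, pvScan]
    | cons hd r =>
      have hhd : hd = '\\' := by simpa using pvDropWhile_head _ _ _ _ hrem
      subst hhd
      rw [pvSplit1_run_cons _ _ _ _ hrem]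
      rw [hrem] at ih
      simp only [pvSplit1, reduceIte] at ih
      cases hs : pvSplit1 '\\' r with
      | nil => exact absurd hs (pvSplit1_ne_nil _ r)
      | cons p ps =>
        rw [hs] at ih
        have hnil : PySem.Chars.isIn [' '] ([] : List Char) = false := by decide
        simp only [List.map_cons, hnil, Bool.false_eq_true, if_false] at ih
        rw [PySem.Chars.join_cons_cons] at ih
        simp only [List.nil_append] at ih
        simp only [List.map_cons]
        rw [PySem.Chars.join_cons_cons, ← ih]
        simp [List.append_assoc]

theorem pvScan_id : ∀ (l : List Char), ' ' ∉ l → pvScan l = l := by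
  intro l
  fun_induction pvScan l with
  | case1 => intro _; rfl
  | case2 rest ih =>
    intro h
    rw [ih (fun hc => h (List.mem_cons_of_mem _ hc))]
  | case3 a rest hne ih =>
    intro h
    have hrun : PySem.Chars.isIn [' '] (List.takeWhile (fun x => x ≠ '\\') (a :: rest)) = false := by
      rw [Bool.eq_false_iff]
      intro hc
      exact h ((List.takeWhile_sublist _).mem ((pvMem_iff_isIn _ _).mp hc))
    rw [hrun]
    simp only [Bool.false_eq_true, if_false]
    rw [ih (fun hc => h ((List.dropWhile_sublist _).mem hc))]
    exact List.takeWhile_append_dropWhile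

-- ===== VERDICT (by name: the statement is the Claim_ definition above) =====
theorem escape_windows_executable_path_spec : Claim_equal_escape_windows_executable_path := by
  intro s _
  unfold Spec_escape_windows_executable_path escape_windows_executable_path escape_windows_executable_path_alt
  split
  · rename_i hno
    have hmem : ' ' ∉ s.toList := by
      intro hm
      have h2 : PySem.Str.isIn " " s = true := by
        show PySem.Chars.isIn " ".toList s.toList = true
        exact (pvMem_iff_isIn ' ' s.toList).mpr hm
      rw [h2] at hno
      cases hno
    rw [pvScan_id _ hmem, String.ofList_toList]
  · simp only [pvFoldl_append_map, List.nil_append, pvSplitOn_eq, pvMain]
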